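-- pv_equiv track=rewrite | github.com/Mega-Sim/perfomance | src/build_graph.py | _count_station_reachability_issues
-- ===== SOURCE A (Python) =====
-- import math, sys, json, collections
--
-- def _count_station_reachability_issues(edge_list, station_nodes, assign):
--     stations = list(station_nodes.values())
--     if len(stations) <= 1:
--         return 0
--     directed = collections.defaultdict(set)
--     for e in edge_list:
--         src, dst = (e["u"], e["v"]) if assign[e["id"]] == 0 else (e["v"], e["u"])
--         directed[src].add(dst)
--
--     def bfs(start):
--         seen = {start}
--         q = collections.deque([start])
--         while q:
--             cur = q.popleft()
--             for nxt in directed.get(cur, ()):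
--                 if nxt not in seen:
--                     seen.add(nxt)
--                     q.append(nxt)
--         return seen
--
--     issues = 0
--     for s in stations:
--         seen = bfs(s)
--         if any(t not in seen for t in stations if t != s):
--             issues += 1
--     return issues
-- ===== SOURCE B (Python) =====
-- def _count_station_reachability_issues(edge_list, station_nodes, assign):
--     stations = list(station_nodes.values())
--     if len(stations) <= 1:
--         return 0
--     # orient each edge once, up front
--     pairs = [(e["u"], e["v"]) if assign[e["id"]] == 0 else (e["v"], e["u"])
--              for e in edge_list]
--     issues = 0
--     for s in stations:
--         # Bellman-Ford-style edge relaxation to a fixpoint (no queue)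
--         reach = {s}
--         changed = True
--         while changed:
--             changed = False
--             for u, v in pairs:
--                 if u in reach and v not in reach:
--                     reach.add(v)
--                     changed = True
--         if any(t not in reach for t in stations if t != s):
--             issues += 1
--     return issues
-- ===== Notes on version B (the rewrite author's own statement) =====
-- stated objective: alternative
-- what changed: Replaces A's per-station BFS (deque + visited set over a defaultdict-of-sets adjacency map) by a per-station Bellman-Ford-style edge relaxation to a fixpoint over a once-precomputed oriented edge-pair list.
import Mathlib
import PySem

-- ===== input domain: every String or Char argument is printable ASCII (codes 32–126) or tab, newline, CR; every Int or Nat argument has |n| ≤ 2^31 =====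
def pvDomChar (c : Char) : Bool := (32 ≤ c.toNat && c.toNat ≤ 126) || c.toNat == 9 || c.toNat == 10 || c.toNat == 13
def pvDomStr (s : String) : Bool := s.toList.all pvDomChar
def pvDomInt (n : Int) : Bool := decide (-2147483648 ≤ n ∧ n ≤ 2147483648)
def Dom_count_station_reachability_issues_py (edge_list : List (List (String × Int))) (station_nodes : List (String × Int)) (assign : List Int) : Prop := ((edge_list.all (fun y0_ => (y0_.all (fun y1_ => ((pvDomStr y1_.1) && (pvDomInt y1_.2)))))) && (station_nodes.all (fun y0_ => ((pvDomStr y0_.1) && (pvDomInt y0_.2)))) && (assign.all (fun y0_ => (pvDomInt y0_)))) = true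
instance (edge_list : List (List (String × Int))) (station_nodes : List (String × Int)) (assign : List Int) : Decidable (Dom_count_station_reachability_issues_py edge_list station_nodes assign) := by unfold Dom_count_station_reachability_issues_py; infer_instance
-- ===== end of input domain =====

-- B replaces A's per-station BFS (queue + visited set) by a per-station Bellman–Ford-style
-- edge-relaxation to a fixpoint over a once-precomputed oriented edge-pair list ('alternative';
-- no speed claim): same return value proved for every input on which A returns.

-- ===== PORT A =====
-- inner loop of bfs: 'for nxt in directed.get(cur, ()): if nxt not in seen: seen.add(nxt); q.append(nxt)'
def bfsVisit (sq : PySem.Set Int × List Int) (nxt : Int) : PySem.Set Int × List Int :=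
  if PySem.Set.contains sq.1 nxt then sq else (PySem.Set.add sq.1 nxt, sq.2 ++ [nxt])

-- 'while q:' of bfs; fuel (edge_list.length + 1) only totalizes the loop: each iteration pops one
-- queue element and at most one element per edge is ever enqueued after the start node.
def bfsLoop (adj : PySem.Dict Int (PySem.Set Int)) : Nat → PySem.Set Int → List Int → PySem.Set Int
  | _, seen, [] => seen
  | 0, seen, _ :: _ => seen
  | fuel+1, seen, cur :: rest =>
    let p := (adj.getD cur PySem.Set.empty).foldl bfsVisit (seen, rest)
    bfsLoop adj fuel p.1 p.2

-- one iteration of 'for e in edge_list: …; directed[src].add(dst)' (defaultdict(set))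
def addDirected (assign : List Int) (d : PySem.Dict Int (PySem.Set Int)) (e : List (String × Int)) : PySem.Dict Int (PySem.Set Int) :=
  let ed := PySem.Dict.mk e
  let sd := if PySem.List.pyGetD assign (ed.getD "id" 0) 0 == 0
            then (ed.getD "u" 0, ed.getD "v" 0)
            else (ed.getD "v" 0, ed.getD "u" 0)
  d.modify sd.1 PySem.Set.empty (fun t => PySem.Set.add t sd.2)

def count_station_reachability_issues_py (edge_list : List (List (String × Int))) (station_nodes : List (String × Int)) (assign : List Int) : Int :=
  let stations := station_nodes.map (fun p => p.2)
  if stations.length ≤ 1 then 0 else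
  let directed := edge_list.foldl (addDirected assign) PySem.Dict.empty
  stations.foldl (fun issues s =>
    let seen := bfsLoop directed (edge_list.length + 1) (PySem.Set.ofList [s]) [s]
    if stations.any (fun t => (t != s) && !(PySem.Set.contains seen t)) then issues + 1 else issues) 0

-- ===== PORT B =====
-- '(e["u"], e["v"]) if assign[e["id"]] == 0 else (e["v"], e["u"])'
def orientEdge (assign : List Int) (e : List (String × Int)) : Int × Int :=
  let ed := PySem.Dict.mk e
  if PySem.List.pyGetD assign (ed.getD "id" 0) 0 == 0
  then (ed.getD "u" 0, ed.getD "v" 0)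
  else (ed.getD "v" 0, ed.getD "u" 0)

-- 'if u in reach and v not in reach: reach.add(v); changed = True'
def relaxStep (rc : PySem.Set Int × Bool) (q : Int × Int) : PySem.Set Int × Bool :=
  if PySem.Set.contains rc.1 q.1 && !(PySem.Set.contains rc.1 q.2)
  then (PySem.Set.add rc.1 q.2, true) else rc

-- 'while changed:' ; fuel (pairs.length + 1) only totalizes the loop: every pass but the last
-- adds at least one node to reach, and at most one node per pair can ever be added.
def relaxLoop (pairs : List (Int × Int)) : Nat → PySem.Set Int → PySem.Set Int
  | 0, r => r
  | fuel+1, r =>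
    let p := pairs.foldl relaxStep (r, false)
    if p.2 then relaxLoop pairs fuel p.1 else p.1

def count_station_reachability_issues_py_alt (edge_list : List (List (String × Int))) (station_nodes : List (String × Int)) (assign : List Int) : Int :=
  let stations := station_nodes.map (fun p => p.2)
  if stations.length ≤ 1 then 0 else
  let pairs := edge_list.map (orientEdge assign)
  stations.foldl (fun issues s =>
    let reach := relaxLoop pairs (pairs.length + 1) (PySem.Set.ofList [s])
    if stations.any (fun t => (t != s) && !(PySem.Set.contains reach t)) then issues + 1 else issues) 0

-- ===== PRECONDITION & SPEC =====
-- Pre_ excludes exactly the inputs where Python A raises: with two or more stations, every edge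
-- dict must have keys "u", "v", "id" (else KeyError) and assign[e["id"]] must be in range
-- (else IndexError).  With at most one station A returns 0 before touching any edge.
def Pre_count_station_reachability_issues_py (edge_list : List (List (String × Int))) (station_nodes : List (String × Int)) (assign : List Int) : Prop :=
  station_nodes.length ≤ 1 ∨
  ∀ e ∈ edge_list,
    (PySem.Dict.mk e).contains "id" = true ∧
    (PySem.Dict.mk e).contains "u" = true ∧
    (PySem.Dict.mk e).contains "v" = true ∧
    PySem.Raise.InRange assign.length ((PySem.Dict.mk e).getD "id" 0)

instance (edge_list : List (List (String × Int))) (station_nodes : List (String × Int)) (assign : List Int) : Decidable (Pre_count_station_reachability_issues_py edge_list station_nodes assign) := by unfold Pre_count_station_reachability_issues_py; infer_instance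

def pvWitness_count_station_reachability_issues_py : (List (List (String × Int))) × (List (String × Int)) × List Int :=
  ([[("u", 0), ("v", 1), ("id", 0)]], ([("a", 0), ("b", 1)], [0]))

def Spec_count_station_reachability_issues_py (edge_list : List (List (String × Int))) (station_nodes : List (String × Int)) (assign : List Int) (out : Int) : Prop := out = count_station_reachability_issues_py_alt edge_list station_nodes assign
instance (edge_list : List (List (String × Int))) (station_nodes : List (String × Int)) (assign : List Int) (out : Int) : Decidable (Spec_count_station_reachability_issues_py edge_list station_nodes assign out) := by unfold Spec_count_station_reachability_issues_py; infer_instance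

-- ===== CLAIM (what is proved, stated in full; the proofs are below) =====
def Claim_equal_count_station_reachability_issues_py : Prop := ∀ (edge_list : List (List (String × Int))) (station_nodes : List (String × Int)) (assign : List Int), Dom_count_station_reachability_issues_py edge_list station_nodes assign → Pre_count_station_reachability_issues_py edge_list station_nodes assign → Spec_count_station_reachability_issues_py edge_list station_nodes assign (count_station_reachability_issues_py edge_list station_nodes assign)

-- ===== LEMMAS AND PROOFS =====

-- the oriented edge relation and reachability
def StepRel (ps : List (Int × Int)) (a b : Int) : Prop := (a, b) ∈ ps
def Reach (ps : List (Int × Int)) (s t : Int) : Prop := Relation.ReflTransGen (StepRel ps) s t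

-- number of potential nodes (start s0 plus all edge targets) not yet in r
def uns (s0 : Int) (ps : List (Int × Int)) (r : List Int) : Nat :=
  ((insert s0 (ps.map Prod.snd).toFinset).filter (fun x => x ∉ r)).card

-- a set r containing s0 and closed under the edge relation contains everything reachable
theorem mem_of_reach {ps : List (Int × Int)} {s t : Int} {r : List Int}
    (hs : s ∈ r) (hcl : ∀ a b : Int, (a, b) ∈ ps → a ∈ r → b ∈ r) (h : Reach ps s t) : t ∈ r := by
  induction h with
  | refl => exact hs
  | tail _ hab ih => exact hcl _ _ hab ih

def GoodSet (ps : List (Int × Int)) (s : Int) (r : List Int) : Prop :=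
  s ∈ r ∧ (∀ x ∈ r, Reach ps s x) ∧ (∀ a b : Int, (a, b) ∈ ps → a ∈ r → b ∈ r)

theorem goodSet_mem_iff {ps : List (Int × Int)} {s t : Int} {r r' : List Int}
    (h : GoodSet ps s r) (h' : GoodSet ps s r') : t ∈ r ↔ t ∈ r' := by
  constructor
  · intro ht; exact mem_of_reach h'.1 h'.2.2 (h.2.1 t ht)
  · intro ht; exact mem_of_reach h.1 h.2.2 (h'.2.1 t ht)

theorem uns_add {s0 : Int} {ps : List (Int × Int)} {r : List Int} {x : Int}
    (hU : x ∈ insert s0 (ps.map Prod.snd).toFinset) (hx : x ∉ r) :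
    uns s0 ps r = uns s0 ps (PySem.Set.add r x) + 1 := by
  unfold uns
  have hset : (insert s0 (ps.map Prod.snd).toFinset).filter (fun y => y ∉ PySem.Set.add r x)
      = ((insert s0 (ps.map Prod.snd).toFinset).filter (fun y => y ∉ r)).erase x := by
    ext y
    simp only [Finset.mem_filter, Finset.mem_erase, PySem.Set.mem_add]
    tauto
  have hxmem : x ∈ (insert s0 (ps.map Prod.snd).toFinset).filter (fun y => y ∉ r) :=
    Finset.mem_filter.mpr ⟨hU, hx⟩
  rw [hset, Finset.card_erase_of_mem hxmem]
  have hpos : 0 < ((insert s0 (ps.map Prod.snd).toFinset).filter (fun y => y ∉ r)).card :=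
    Finset.card_pos.mpr ⟨x, hxmem⟩
  omega

theorem uns_init (s0 : Int) (ps : List (Int × Int)) : uns s0 ps [s0] ≤ ps.length := by
  unfold uns
  have h1 : (insert s0 (ps.map Prod.snd).toFinset).filter (fun x => x ∉ [s0]) ⊆ (ps.map Prod.snd).toFinset := by
    intro y hy
    simp only [Finset.mem_filter, Finset.mem_insert, List.mem_singleton] at hy
    rcases hy with ⟨h2 | h2, h3⟩
    · exact absurd h2 h3
    · exact h2
  calc ((insert s0 (ps.map Prod.snd).toFinset).filter (fun x => x ∉ [s0])).card
      ≤ (ps.map Prod.snd).toFinset.card := Finset.card_le_card h1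
    _ ≤ (ps.map Prod.snd).length := List.toFinset_card_le _
    _ = ps.length := List.length_map ..

-- ----- A side: the BFS -----
theorem bfs_fold (L : List Int) : ∀ (seen : PySem.Set Int) (q : List Int), seen.Nodup →
    (∀ x ∈ seen, x ∈ (L.foldl bfsVisit (seen, q)).1) ∧
    (∀ x ∈ (L.foldl bfsVisit (seen, q)).1, x ∈ seen ∨ x ∈ L) ∧
    (∀ x ∈ L, x ∈ (L.foldl bfsVisit (seen, q)).1) ∧
    (∀ x ∈ q, x ∈ (L.foldl bfsVisit (seen, q)).2) ∧
    (∀ x ∈ (L.foldl bfsVisit (seen, q)).2, x ∈ q ∨ x ∈ (L.foldl bfsVisit (seen, q)).1) ∧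
    (∀ x ∈ (L.foldl bfsVisit (seen, q)).1, x ∈ seen ∨ x ∈ (L.foldl bfsVisit (seen, q)).2) ∧
    (L.foldl bfsVisit (seen, q)).1.Nodup ∧
    (∀ (s0 : Int) (ps : List (Int × Int)), (∀ x ∈ L, x ∈ insert s0 (ps.map Prod.snd).toFinset) →
      (L.foldl bfsVisit (seen, q)).2.length + uns s0 ps (L.foldl bfsVisit (seen, q)).1 ≤ q.length + uns s0 ps seen) := by
  induction L with
  | nil =>
    intro seen q hnd
    simp only [List.foldl_nil]
    exact ⟨fun x h => h, fun x h => Or.inl h, by simp, fun x h => h, fun x h => Or.inl h,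
      fun x h => Or.inl h, hnd, by intro s0 ps _; omega⟩
  | cons nxt L ih =>
    intro seen q hnd
    simp only [List.foldl_cons]
    by_cases hc : PySem.Set.contains seen nxt = true
    · have hnxt : nxt ∈ seen := (PySem.Set.contains_iff seen nxt).mp hc
      have hstep : bfsVisit (seen, q) nxt = (seen, q) := by simp [bfsVisit, hnxt]
      rw [hstep]
      obtain ⟨a, b, c, d, e, f, g, h⟩ := ih seen q hnd
      refine ⟨a, ?_, ?_, d, e, f, g, ?_⟩
      · intro x hx
        rcases b x hx with h' | h'
        · exact Or.inl h'
        · exact Or.inr (List.mem_cons_of_mem _ h')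
      · intro x hx
        rcases List.mem_cons.mp hx with rfl | h'
        · exact a _ hnxt
        · exact c _ h'
      · intro s0 ps hL
        exact h s0 ps (fun x hx => hL x (List.mem_cons_of_mem _ hx))
    · have hnxt : nxt ∉ seen := fun hmem => hc ((PySem.Set.contains_iff seen nxt).mpr hmem)
      have hstep : bfsVisit (seen, q) nxt = (PySem.Set.add seen nxt, q ++ [nxt]) := by
        simp [bfsVisit, hnxt]
      rw [hstep]
      have hnd' : (PySem.Set.add seen nxt).Nodup := PySem.Set.nodup_add seen nxt hnd
      obtain ⟨a, b, c, d, e, f, g, h⟩ := ih (PySem.Set.add seen nxt) (q ++ [nxt]) hnd'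
      have hmemadd : ∀ x, x ∈ PySem.Set.add seen nxt ↔ x ∈ seen ∨ x = nxt :=
        fun x => PySem.Set.mem_add seen nxt x
      refine ⟨?_, ?_, ?_, ?_, ?_, ?_, g, ?_⟩
      · intro x hx; exact a x ((hmemadd x).mpr (Or.inl hx))
      · intro x hx
        rcases b x hx with h' | h'
        · rcases (hmemadd x).mp h' with h'' | rfl
          · exact Or.inl h''
          · exact Or.inr (by simp)
        · exact Or.inr (List.mem_cons_of_mem _ h')
      · intro x hx
        rcases List.mem_cons.mp hx with rfl | h'
        · exact a x ((hmemadd x).mpr (Or.inr rfl))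
        · exact c x h'
      · intro x hx; exact d x (List.mem_append_left _ hx)
      · intro x hx
        rcases e x hx with h' | h'
        · rcases List.mem_append.mp h' with h'' | h''
          · exact Or.inl h''
          · have hxe : x = nxt := List.mem_singleton.mp h''
            subst hxe
            exact Or.inr (a x ((hmemadd x).mpr (Or.inr rfl)))
        · exact Or.inr h'
      · intro x hx
        rcases f x hx with h' | h'
        · rcases (hmemadd x).mp h' with h'' | rfl
          · exact Or.inl h''
          · exact Or.inr (d _ (List.mem_append_right _ (by simp)))
        · exact Or.inr h'
      · intro s0 ps hL
        have hU : nxt ∈ insert s0 (ps.map Prod.snd).toFinset := hL nxt (by simp)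
        have heq := uns_add (s0 := s0) (ps := ps) hU hnxt
        have hrec := h s0 ps (fun x hx => hL x (List.mem_cons_of_mem _ hx))
        simp only [List.length_append, List.length_cons, List.length_nil] at hrec ⊢
        omega

theorem bfs_loop_good (ps : List (Int × Int)) (adj : PySem.Dict Int (PySem.Set Int))
    (Hadj : ∀ u v : Int, v ∈ adj.getD u PySem.Set.empty ↔ (u, v) ∈ ps) (s0 : Int) :
    ∀ (fuel : Nat) (seen : PySem.Set Int) (q : List Int),
    seen.Nodup → s0 ∈ seen →
    (∀ x ∈ seen, Reach ps s0 x) →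
    (∀ x ∈ q, x ∈ seen) →
    (∀ x ∈ seen, x ∉ q → ∀ y, (x, y) ∈ ps → y ∈ seen) →
    q.length + uns s0 ps seen ≤ fuel →
    GoodSet ps s0 (bfsLoop adj fuel seen q) := by
  intro fuel
  induction fuel with
  | zero =>
    intro seen q hnd hs hreach hq hcl hb
    cases q with
    | nil =>
      refine ⟨hs, hreach, ?_⟩
      intro a b hab ha
      exact hcl a ha (by simp) b hab
    | cons cur rest =>
      exfalso
      simp only [List.length_cons] at hb
      omega
  | succ f ihf =>
    intro seen q hnd hs hreach hq hcl hb
    cases q with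
    | nil =>
      refine ⟨hs, hreach, ?_⟩
      intro a b hab ha
      exact hcl a ha (by simp) b hab
    | cons cur rest =>
      have hred : bfsLoop adj (f+1) seen (cur :: rest)
          = bfsLoop adj f ((adj.getD cur PySem.Set.empty).foldl bfsVisit (seen, rest)).1
              ((adj.getD cur PySem.Set.empty).foldl bfsVisit (seen, rest)).2 := rfl
      rw [hred]
      obtain ⟨a, b, c, d, e, f6, g, h⟩ := bfs_fold (adj.getD cur PySem.Set.empty) seen rest hnd
      have hcur : cur ∈ seen := hq cur (by simp)
      have hLps : ∀ x ∈ adj.getD cur PySem.Set.empty, (cur, x) ∈ ps := fun x hx => (Hadj cur x).mp hx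
      apply ihf
      · exact g
      · exact a s0 hs
      · intro x hx
        rcases b x hx with h' | h'
        · exact hreach x h'
        · exact Relation.ReflTransGen.tail (hreach cur hcur) (hLps x h')
      · intro x hx
        rcases e x hx with h' | h'
        · exact a x (hq x (List.mem_cons_of_mem _ h'))
        · exact h'
      · intro x hx hnq y hxy
        rcases f6 x hx with hxs | hxq
        · by_cases hxc : x = cur
          · subst hxc
            exact c y ((Hadj x y).mpr hxy)
          · by_cases hxr : x ∈ rest
            · exact absurd (d x hxr) hnq
            · have hnotq : x ∉ cur :: rest := by simp [hxc, hxr]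
              exact a y (hcl x hxs hnotq y hxy)
        · exact absurd hxq hnq
      · have hLU : ∀ x ∈ adj.getD cur PySem.Set.empty, x ∈ insert s0 (ps.map Prod.snd).toFinset := by
          intro x hx
          exact Finset.mem_insert_of_mem (List.mem_toFinset.mpr (List.mem_map.mpr ⟨(cur, x), hLps x hx, rfl⟩))
        have hq' := h s0 ps hLU
        simp only [List.length_cons] at hb
        omega

-- ----- B side: the relaxation -----
theorem relax_flag_true (l : List (Int × Int)) : ∀ r : PySem.Set Int, (l.foldl relaxStep (r, true)).2 = true := by
  induction l with
  | nil => intro r; rfl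
  | cons q l ih =>
    intro r
    simp only [List.foldl_cons, relaxStep]
    split
    · exact ih _
    · exact ih r

theorem relax_nochange (l : List (Int × Int)) : ∀ r : PySem.Set Int,
    (l.foldl relaxStep (r, false)).2 = false →
    (l.foldl relaxStep (r, false)).1 = r ∧ ∀ q ∈ l, q.1 ∈ r → q.2 ∈ r := by
  induction l with
  | nil => intro r _; exact ⟨rfl, by simp⟩
  | cons q l ih =>
    intro r h
    simp only [List.foldl_cons] at h ⊢
    by_cases hcnd : (PySem.Set.contains r q.1 && !(PySem.Set.contains r q.2)) = true
    · have hm := (Bool.and_eq_true _ _).mp hcnd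
      have hq1m : q.1 ∈ r := (PySem.Set.contains_iff r q.1).mp hm.1
      have hq2m : q.2 ∉ r := by
        intro hmm
        rw [(PySem.Set.contains_iff r q.2).mpr hmm] at hm
        exact absurd hm.2 (by simp)
      have hstep : relaxStep (r, false) q = (PySem.Set.add r q.2, true) := by
        simp [relaxStep, hq1m, hq2m]
      rw [hstep] at h
      have hflag := relax_flag_true l (PySem.Set.add r q.2)
      rw [hflag] at h
      exact absurd h (by simp)
    · have hstep : relaxStep (r, false) q = (r, false) := by
        simp only [relaxStep]
        rw [if_neg hcnd]
      rw [hstep] at h ⊢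
      obtain ⟨h1, h2⟩ := ih r h
      refine ⟨h1, ?_⟩
      intro p hp hpr
      rcases List.mem_cons.mp hp with rfl | hp'
      · by_contra hnot
        apply hcnd
        have hc1 : PySem.Set.contains r p.1 = true := (PySem.Set.contains_iff r p.1).mpr hpr
        have hc2 : PySem.Set.contains r p.2 = false := by
          rw [Bool.eq_false_iff]
          exact fun hc => hnot ((PySem.Set.contains_iff r p.2).mp hc)
        rw [hc1, hc2]
        rfl
      · exact h2 p hp' hpr

theorem relax_pass (ps : List (Int × Int)) (s0 : Int) : ∀ (l : List (Int × Int)), (∀ q ∈ l, q ∈ ps) →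
    ∀ (r : PySem.Set Int) (c : Bool), r.Nodup → s0 ∈ r → (∀ x ∈ r, Reach ps s0 x) →
    (l.foldl relaxStep (r, c)).1.Nodup ∧
    (∀ x ∈ r, x ∈ (l.foldl relaxStep (r, c)).1) ∧
    (∀ x ∈ (l.foldl relaxStep (r, c)).1, Reach ps s0 x) ∧
    uns s0 ps (l.foldl relaxStep (r, c)).1 ≤ uns s0 ps r ∧
    ((l.foldl relaxStep (r, c)).2 = true → c = true ∨ uns s0 ps (l.foldl relaxStep (r, c)).1 < uns s0 ps r) := by
  intro l
  induction l with
  | nil =>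
    intro _ r c hnd hs hr
    simp only [List.foldl_nil]
    exact ⟨hnd, fun x h => h, hr, le_refl _, fun h => Or.inl h⟩
  | cons q l ih =>
    intro hl r c hnd hs hr
    have hq : q ∈ ps := hl q (by simp)
    have hl' : ∀ p ∈ l, p ∈ ps := fun p hp => hl p (by simp [hp])
    simp only [List.foldl_cons]
    by_cases hcnd : (PySem.Set.contains r q.1 && !(PySem.Set.contains r q.2)) = true
    · have hq1r : q.1 ∈ r := by
        have hc := (Bool.and_eq_true _ _).mp hcnd
        exact (PySem.Set.contains_iff r q.1).mp hc.1
      have hq2r : q.2 ∉ r := by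
        have hc := (Bool.and_eq_true _ _).mp hcnd
        intro hmem
        rw [(PySem.Set.contains_iff r q.2).mpr hmem] at hc
        exact absurd hc.2 (by simp)
      have hstep : relaxStep (r, c) q = (PySem.Set.add r q.2, true) := by
        simp [relaxStep, hq1r, hq2r]
      rw [hstep]
      have hU : q.2 ∈ insert s0 (ps.map Prod.snd).toFinset :=
        Finset.mem_insert_of_mem (List.mem_toFinset.mpr (List.mem_map.mpr ⟨q, hq, rfl⟩))
      have hunseq := uns_add (s0 := s0) (ps := ps) hU hq2r
      have hnd' := PySem.Set.nodup_add r q.2 hnd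
      have hs' : s0 ∈ PySem.Set.add r q.2 := (PySem.Set.mem_add r q.2 s0).mpr (Or.inl hs)
      have hr' : ∀ x ∈ PySem.Set.add r q.2, Reach ps s0 x := by
        intro x hx
        rcases (PySem.Set.mem_add r q.2 x).mp hx with h' | rfl
        · exact hr x h'
        · exact Relation.ReflTransGen.tail (hr q.1 hq1r) (show StepRel ps q.1 q.2 by simpa [StepRel] using hq)
      obtain ⟨i1, i2, i3, i4, i5⟩ := ih hl' (PySem.Set.add r q.2) true hnd' hs' hr'
      refine ⟨i1, ?_, i3, ?_, ?_⟩
      · intro x hx; exact i2 x ((PySem.Set.mem_add r q.2 x).mpr (Or.inl hx))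
      · omega
      · intro _; right; omega
    · have hstep : relaxStep (r, c) q = (r, c) := by
        simp only [relaxStep]
        rw [if_neg hcnd]
      rw [hstep]
      exact ih hl' r c hnd hs hr

theorem relax_loop_good (ps : List (Int × Int)) (s0 : Int) :
    ∀ (fuel : Nat) (r : PySem.Set Int), r.Nodup → s0 ∈ r → (∀ x ∈ r, Reach ps s0 x) →
    uns s0 ps r < fuel → GoodSet ps s0 (relaxLoop ps fuel r) := by
  intro fuel
  induction fuel with
  | zero => intro r _ _ _ hlt; exact absurd hlt (Nat.not_lt_zero _)
  | succ f ihf =>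
    intro r hnd hs hr hlt
    have hred : relaxLoop ps (f+1) r
        = (if (ps.foldl relaxStep (r, false)).2 then relaxLoop ps f (ps.foldl relaxStep (r, false)).1
           else (ps.foldl relaxStep (r, false)).1) := rfl
    rw [hred]
    by_cases hflag : (ps.foldl relaxStep (r, false)).2 = true
    · rw [if_pos hflag]
      obtain ⟨i1, i2, i3, i4, i5⟩ := relax_pass ps s0 ps (fun p hp => hp) r false hnd hs hr
      have hdec : uns s0 ps (ps.foldl relaxStep (r, false)).1 < uns s0 ps r := by
        rcases i5 hflag with h | h
        · exact absurd h (by simp)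
        · exact h
      exact ihf _ i1 (i2 s0 hs) i3 (by omega)
    · rw [if_neg hflag]
      obtain ⟨h1, h2⟩ := relax_nochange ps r (by simpa using hflag)
      rw [h1]
      exact ⟨hs, hr, fun a b hab har => h2 (a, b) hab har⟩

-- ----- the two adjacency representations describe the same relation -----
theorem adj_getD (assign : List Int) : ∀ (es : List (List (String × Int))) (d : PySem.Dict Int (PySem.Set Int)) (ps0 : List (Int × Int)),
    (∀ u v : Int, v ∈ d.getD u PySem.Set.empty ↔ (u, v) ∈ ps0) →
    ∀ u v : Int, v ∈ (es.foldl (addDirected assign) d).getD u PySem.Set.empty ↔ (u, v) ∈ ps0 ++ es.map (orientEdge assign) := by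
  intro es
  induction es with
  | nil =>
    intro d ps0 h u v
    simpa using h u v
  | cons e es ih =>
    intro d ps0 h u v
    simp only [List.foldl_cons, List.map_cons]
    have hstep : ∀ u v : Int, v ∈ (addDirected assign d e).getD u PySem.Set.empty ↔ (u, v) ∈ ps0 ++ [orientEdge assign e] := by
      intro u v
      have heq : addDirected assign d e
          = d.modify (orientEdge assign e).1 PySem.Set.empty (fun t => PySem.Set.add t (orientEdge assign e).2) := rfl
      rw [heq, PySem.Dict.getD_modify]
      by_cases hu : u = (orientEdge assign e).1
      · subst hu
        rw [if_pos rfl]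
        simp only [PySem.Set.mem_add, h, List.mem_append, List.mem_singleton, Prod.ext_iff]
        tauto
      · rw [if_neg hu, h u v]
        simp only [List.mem_append, List.mem_singleton, Prod.ext_iff]
        constructor
        · intro hm; exact Or.inl hm
        · rintro (hm | ⟨h1, h2⟩)
          · exact hm
          · exact absurd h1 hu
    have hrec := ih (addDirected assign d e) (ps0 ++ [orientEdge assign e]) hstep u v
    rw [hrec]
    simp

-- ----- per-station agreement and the final congruence -----
theorem station_sets_agree (edge_list : List (List (String × Int))) (assign : List Int) (s t : Int) :
    PySem.Set.contains (bfsLoop (edge_list.foldl (addDirected assign) PySem.Dict.empty) (edge_list.length + 1) (PySem.Set.ofList [s]) [s]) t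
    = PySem.Set.contains (relaxLoop (edge_list.map (orientEdge assign)) ((edge_list.map (orientEdge assign)).length + 1) (PySem.Set.ofList [s])) t := by
  have hofs : PySem.Set.ofList [s] = [s] := rfl
  have Hadj : ∀ u v : Int, v ∈ (edge_list.foldl (addDirected assign) PySem.Dict.empty).getD u PySem.Set.empty
      ↔ (u, v) ∈ edge_list.map (orientEdge assign) := by
    intro u v
    have h0 : ∀ u v : Int, v ∈ (PySem.Dict.empty (κ := Int) (ν := PySem.Set Int)).getD u PySem.Set.empty ↔ (u, v) ∈ ([] : List (Int × Int)) := by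
      intro u v
      simp [PySem.Dict.getD_empty, PySem.Set.empty]
    simpa using adj_getD assign edge_list PySem.Dict.empty [] h0 u v
  have hinit1 : ([s] : List Int).Nodup := by simp
  have hinit2 : s ∈ ([s] : List Int) := by simp
  have hinit3 : ∀ x ∈ ([s] : List Int), Reach (edge_list.map (orientEdge assign)) s x := by
    intro x hx
    have : x = s := by simpa using hx
    subst this
    exact Relation.ReflTransGen.refl
  have hlen : (edge_list.map (orientEdge assign)).length = edge_list.length := List.length_map ..
  have hgA : GoodSet (edge_list.map (orientEdge assign)) s
      (bfsLoop (edge_list.foldl (addDirected assign) PySem.Dict.empty) (edge_list.length + 1) (PySem.Set.ofList [s]) [s]) := by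
    rw [hofs]
    apply bfs_loop_good (edge_list.map (orientEdge assign)) _ Hadj s (edge_list.length + 1) [s] [s]
      hinit1 hinit2 hinit3
    · intro x hx; exact hx
    · intro x hx hnx; exact absurd hx hnx
    · have := uns_init s (edge_list.map (orientEdge assign))
      simp only [List.length_cons, List.length_nil]
      omega
  have hgB : GoodSet (edge_list.map (orientEdge assign)) s
      (relaxLoop (edge_list.map (orientEdge assign)) ((edge_list.map (orientEdge assign)).length + 1) (PySem.Set.ofList [s])) := by
    rw [hofs]
    apply relax_loop_good (edge_list.map (orientEdge assign)) s _ [s] hinit1 hinit2 hinit3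
    have := uns_init s (edge_list.map (orientEdge assign))
    omega
  have hmem := goodSet_mem_iff (t := t) hgA hgB
  by_cases ht : t ∈ bfsLoop (edge_list.foldl (addDirected assign) PySem.Dict.empty) (edge_list.length + 1) (PySem.Set.ofList [s]) [s]
  · rw [(PySem.Set.contains_iff _ t).mpr ht, (PySem.Set.contains_iff _ t).mpr (hmem.mp ht)]
  · have hA : PySem.Set.contains (bfsLoop (edge_list.foldl (addDirected assign) PySem.Dict.empty) (edge_list.length + 1) (PySem.Set.ofList [s]) [s]) t = false := by
      rw [Bool.eq_false_iff]
      exact fun hc => ht ((PySem.Set.contains_iff _ t).mp hc)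
    have hB : PySem.Set.contains (relaxLoop (edge_list.map (orientEdge assign)) ((edge_list.map (orientEdge assign)).length + 1) (PySem.Set.ofList [s])) t = false := by
      rw [Bool.eq_false_iff]
      exact fun hc => ht (hmem.mpr ((PySem.Set.contains_iff _ t).mp hc))
    rw [hA, hB]

theorem any_congr {α : Type} (l : List α) (f g : α → Bool) (h : ∀ x ∈ l, f x = g x) : l.any f = l.any g := by
  induction l with
  | nil => rfl
  | cons a l ih => simp only [List.any_cons, h a (by simp), ih (fun x hx => h x (by simp [hx]))]

-- ===== VERDICT (by name: the statement is the Claim_ definition above) =====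
theorem count_station_reachability_issues_py_spec : Claim_equal_count_station_reachability_issues_py := by
  intro edge_list station_nodes assign _ _
  unfold Spec_count_station_reachability_issues_py
  unfold count_station_reachability_issues_py count_station_reachability_issues_py_alt
  simp only
  split
  · rfl
  · apply PySem.List.foldl_congr_mem
    intro acc s hs
    have hb : ∀ t : Int,
        PySem.Set.contains (bfsLoop (edge_list.foldl (addDirected assign) PySem.Dict.empty) (edge_list.length + 1) (PySem.Set.ofList [s]) [s]) t
        = PySem.Set.contains (relaxLoop (edge_list.map (orientEdge assign)) ((edge_list.map (orientEdge assign)).length + 1) (PySem.Set.ofList [s])) t :=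
      station_sets_agree edge_list assign s
    have hany := any_congr (station_nodes.map (fun p => p.2))
      (fun t => (t != s) && !(PySem.Set.contains (bfsLoop (edge_list.foldl (addDirected assign) PySem.Dict.empty) (edge_list.length + 1) (PySem.Set.ofList [s]) [s]) t))
      (fun t => (t != s) && !(PySem.Set.contains (relaxLoop (edge_list.map (orientEdge assign)) ((edge_list.map (orientEdge assign)).length + 1) (PySem.Set.ofList [s])) t))
      (fun t _ => by simp only [hb t])
    rw [hany]
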